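-- pv_equiv track=rewrite | github.com/ZBeimnet/competitiveProgramming | Week-02/Day06/RelativeSortArray.py | sort_array_relatively
-- ===== SOURCE A (Python) =====
-- def sort_array_relatively(array1, array2):
--     sorted_list = []
--     left_out_elements = []
--
--     arr2_index = 0
--     while arr2_index < len(array2):
--         for i in range(len(array1)):
--             if array1[i] == array2[arr2_index]:
--                 sorted_list.append(array1[i])
--         arr2_index += 1
--
--     for i in range(len(array1)):
--         if array1[i] not in array2:
--             left_out_elements.append(array1[i])
--
--     left_out_elements.sort()
--
--     for i in range(len(left_out_elements)):
--         sorted_list.append(left_out_elements[i])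
--
--     return sorted_list
-- ===== SOURCE B (Python) =====
-- def sort_array_relatively(array1, array2):
--     counts = {}
--     for x in array1:
--         counts[x] = counts.get(x, 0) + 1
--     out = []
--     for y in array2:
--         out += [y] * counts.get(y, 0)
--     seen = set(array2)
--     leftovers = sorted(x for x in array1 if x not in seen)
--     return out + leftovers
-- ===== Notes on version B (the rewrite author's own statement) =====
-- stated objective: faster
-- what changed: Replaces the per-array2-element rescans of array1 and the per-element 'in array2' membership scans by a counter dict built once and a set of array2, emitting count[y] copies per array2 element and sorting the leftovers.
import Mathlib
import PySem

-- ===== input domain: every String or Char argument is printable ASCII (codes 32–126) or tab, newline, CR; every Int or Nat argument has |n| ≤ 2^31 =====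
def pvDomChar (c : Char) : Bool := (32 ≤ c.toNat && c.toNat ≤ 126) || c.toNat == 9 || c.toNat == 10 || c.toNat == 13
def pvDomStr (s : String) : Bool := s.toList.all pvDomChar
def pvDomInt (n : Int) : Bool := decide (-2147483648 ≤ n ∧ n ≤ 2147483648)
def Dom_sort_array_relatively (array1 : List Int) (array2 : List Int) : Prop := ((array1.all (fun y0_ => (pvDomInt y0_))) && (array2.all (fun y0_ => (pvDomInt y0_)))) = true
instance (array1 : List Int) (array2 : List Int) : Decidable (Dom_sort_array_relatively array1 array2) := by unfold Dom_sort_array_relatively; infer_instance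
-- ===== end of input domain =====

-- ===== PORT A =====
-- A: for each element of array2 rescan array1 appending matches; then append the sorted
-- elements of array1 not in array2.
def sort_array_relatively (array1 : List Int) (array2 : List Int) : List Int :=
  let sorted_list := array2.foldl (fun acc y =>
    array1.foldl (fun acc2 x => if x == y then acc2 ++ [x] else acc2) acc) []
  let left_out_elements := array1.foldl
    (fun acc x => if !(array2.contains x) then acc ++ [x] else acc) []
  let left_sorted := PySem.List.sorted left_out_elements (fun x => x) false
  sorted_list ++ left_sorted

-- ===== PORT B =====
-- B: count array1 once into a dict, emit counts[y] copies per array2 element,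
-- sort the leftovers filtered against a set of array2.
def sort_array_relatively_alt (array1 : List Int) (array2 : List Int) : List Int :=
  let counts := array1.foldl
    (fun d x => PySem.Dict.insert d x (PySem.Dict.getD d x 0 + 1)) PySem.Dict.empty
  let out := array2.foldl
    (fun acc y => acc ++ PySem.List.pyRepeat [y] (PySem.Dict.getD counts y 0)) []
  let seen : PySem.Set Int := PySem.Set.ofList array2
  let leftovers := PySem.List.sorted
    (array1.filter (fun x => !(PySem.Set.contains seen x))) (fun x => x) false
  out ++ leftovers

-- ===== PRECONDITION & SPEC =====
def Spec_sort_array_relatively (array1 : List Int) (array2 : List Int) (out : List Int) : Prop := out = sort_array_relatively_alt array1 array2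
instance (array1 : List Int) (array2 : List Int) (out : List Int) : Decidable (Spec_sort_array_relatively array1 array2 out) := by unfold Spec_sort_array_relatively; infer_instance

-- ===== CLAIM (what is proved, stated in full; the proofs are below) =====
def Claim_equal_sort_array_relatively : Prop := ∀ (array1 : List Int) (array2 : List Int), Dom_sort_array_relatively array1 array2 → Spec_sort_array_relatively array1 array2 (sort_array_relatively array1 array2)

-- ===== LEMMAS AND PROOFS =====

-- A's inner rescan of array1 for matches of y appends exactly count(array1, y) copies of y,
-- which is what B's counter lookup emits.
theorem pv_inner_eq (array1 : List Int) (y : Int) (acc : List Int) :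
    array1.foldl (fun acc2 x => if x == y then acc2 ++ [x] else acc2) acc
      = acc ++ PySem.List.pyRepeat [y]
          (PySem.Dict.getD (array1.foldl
            (fun d x => PySem.Dict.insert d x (PySem.Dict.getD d x 0 + 1)) PySem.Dict.empty) y 0) := by
  rw [PySem.List.foldl_append_if_eq_filter, List.filter_beq,
      PySem.Dict.getD_foldl_insert_add_one, PySem.Dict.getD_empty,
      PySem.List.pyRepeat_singleton]
  simp

-- The leftover lists of A and B are the same filter of array1.
theorem pv_leftout_eq (array1 : List Int) (array2 : List Int) :
    array1.foldl (fun acc x => if !(array2.contains x) then acc ++ [x] else acc) []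
      = array1.filter (fun x => !(PySem.Set.contains (PySem.Set.ofList array2) x)) := by
  rw [PySem.List.foldl_append_if_eq_filter]
  simp only [List.nil_append]
  apply List.filter_congr
  intro x _
  simp [PySem.Set.contains, PySem.Set.mem_ofList]

-- ===== VERDICT (by name: the statement is the Claim_ definition above) =====
theorem sort_array_relatively_spec : Claim_equal_sort_array_relatively := by
  intro array1 array2 _
  unfold Spec_sort_array_relatively
  simp only [sort_array_relatively, sort_array_relatively_alt]
  rw [pv_leftout_eq]
  congr 1
  apply PySem.List.foldl_congr_mem
  intro acc y _
  exact pv_inner_eq array1 y acc
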